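-- pv_equiv track=rewrite | github.com/chongyukwai/OOPanddata | heap and heap sort/heapandheapsort.py | get_tree_representation
-- ===== SOURCE A (Python) =====
-- def get_tree_representation(heap):
--     """Get tree-like string representation"""
--     if not heap:
--         return "Empty heap"
--
--     result = []
--     n = len(heap)
--     height = 0
--     while (1 << height) - 1 < n:
--         height += 1
--
--     for level in range(height):
--         level_start = (1 << level) - 1
--         level_end = min((1 << (level + 1)) - 1, n)
--
--         if level_start >= n:
--             break
--
--         level_nodes = heap[level_start:level_end]
--         indent = " " * (height - level) * 3
--         result.append(indent + "   ".join(map(str, level_nodes)))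
--
--     return "\n".join(result)
-- ===== SOURCE B (Python) =====
-- def get_tree_representation(heap):
--     """Get tree-like string representation"""
--     if not heap:
--         return "Empty heap"
--
--     height = len(heap).bit_length()
--     lines = []
--     lvl = 0
--     rest = heap
--     while rest:
--         chunk, rest = rest[:1 << lvl], rest[1 << lvl:]
--         lines.append("   " * (height - lvl) + "   ".join(map(str, chunk)))
--         lvl += 1
--     return "\n".join(lines)
-- ===== Notes on version B (the rewrite author's own statement) =====
-- stated objective: simpler
-- what changed: Replaces the doubling while-loop for the height with the closed-form bit_length and replaces per-level start/end index arithmetic with slicing off a doubling-size chunk of the remaining list each iteration (no break/guard needed).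
import Mathlib
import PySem

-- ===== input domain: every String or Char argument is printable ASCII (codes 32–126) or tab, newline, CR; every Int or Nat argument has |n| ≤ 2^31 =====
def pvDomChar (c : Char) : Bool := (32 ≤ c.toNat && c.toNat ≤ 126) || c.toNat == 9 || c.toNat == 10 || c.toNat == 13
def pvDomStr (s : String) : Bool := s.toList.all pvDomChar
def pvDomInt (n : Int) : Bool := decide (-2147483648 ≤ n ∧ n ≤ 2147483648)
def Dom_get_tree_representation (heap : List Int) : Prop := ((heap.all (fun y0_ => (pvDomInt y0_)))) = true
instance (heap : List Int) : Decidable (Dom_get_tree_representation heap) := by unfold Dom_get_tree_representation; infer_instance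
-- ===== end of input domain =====

-- B replaces A's doubling while-loop height and per-level index arithmetic with a closed-form
-- bit_length height and a single list-consuming loop taking doubling chunks (objective: simpler).

-- ===== PORT A =====
-- Python's  s * k  for a string s and k ≥ 0: s.toList repeated k times (exact).
def pyStrMul (s : String) (k : Nat) : String := String.ofList (List.flatten (List.replicate k s.toList))

-- the 'while (1 << height) - 1 < n: height += 1' loop
def aHeight (n : Nat) (h : Nat) : Nat :=
  if 2 ^ h - 1 < n then aHeight n (h + 1) else h
termination_by n + 1 - 2 ^ h
decreasing_by
  have h1 : 1 ≤ 2 ^ h := Nat.one_le_two_pow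
  have _h2 : 2 ^ h < 2 ^ (h + 1) := Nat.pow_lt_pow_right (by norm_num) (Nat.lt_succ_self h)
  omega

-- the 'for level in range(height): …' loop with its break
def aLoop (heap : List Int) (n : Nat) (height : Nat) (level : Nat) (acc : List String) : List String :=
  if level < height then
    let level_start : Nat := 2 ^ level - 1
    let level_end : Nat := min (2 ^ (level + 1) - 1) n
    if level_start ≥ n then acc
    else
      let level_nodes := PySem.List.slice heap (some (level_start : Int)) (some (level_end : Int))
      let indent := pyStrMul (pyStrMul " " (height - level)) 3
      aLoop heap n height (level + 1)
        (acc ++ [indent ++ PySem.Str.join "   " (level_nodes.map PySem.Int.toStr)])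
  else acc
termination_by height - level

def get_tree_representation (heap : List Int) : String :=
  if heap = [] then "Empty heap"
  else PySem.Str.join "\n" (aLoop heap heap.length (aHeight heap.length 0) 0 [])

-- ===== PORT B =====
-- the 'while rest:' loop of Source B: peel a chunk of 2^lvl elements per line
def bChunks : List Int → Nat → Nat → List String
  | [], _, _ => []
  | x :: xs, lvl, height =>
    (pyStrMul "   " (height - lvl)
        ++ PySem.Str.join "   " (((x :: xs).take (2 ^ lvl)).map PySem.Int.toStr))
      :: bChunks ((x :: xs).drop (2 ^ lvl)) (lvl + 1) height
termination_by rest _ _ => rest.length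
decreasing_by
  have : 1 ≤ 2 ^ lvl := Nat.one_le_two_pow
  simp [List.length_drop]
  omega

def get_tree_representation_alt (heap : List Int) : String :=
  if heap = [] then "Empty heap"
  else PySem.Str.join "\n" (bChunks heap 0 heap.length.size)  -- Nat.size = Python bit_length on Nat

-- ===== PRECONDITION & SPEC =====
def Spec_get_tree_representation (heap : List Int) (out : String) : Prop := out = get_tree_representation_alt heap
instance (heap : List Int) (out : String) : Decidable (Spec_get_tree_representation heap out) := by unfold Spec_get_tree_representation; infer_instance

-- ===== CLAIM (what is proved, stated in full; the proofs are below) =====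
def Claim_equal_get_tree_representation : Prop := ∀ (heap : List Int), Dom_get_tree_representation heap → Spec_get_tree_representation heap (get_tree_representation heap)

-- ===== LEMMAS AND PROOFS =====

lemma aHeight_eq (n h : Nat) : aHeight n h = max h n.size := by
  induction h using aHeight.induct (n := n)
  case case1 h hc ih =>
    rw [aHeight, if_pos hc, ih]
    have h1 : 1 ≤ 2 ^ h := Nat.one_le_two_pow
    have : h < n.size := Nat.lt_size.mpr (by omega)
    omega
  case case2 h hc =>
    rw [aHeight, if_neg hc]
    have h1 : 1 ≤ 2 ^ h := Nat.one_le_two_pow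
    have : n.size ≤ h := Nat.size_le.mpr (by omega)
    omega

lemma indent_eq (k : Nat) : pyStrMul (pyStrMul " " k) 3 = pyStrMul "   " k := by
  unfold pyStrMul
  congr 1
  show (List.replicate 3 (String.ofList (List.replicate k [' ']).flatten).toList).flatten = _
  rw [List.flatten_replicate_singleton]
  have h1 : (String.ofList (List.replicate k ' ')).toList = List.replicate k ' ' := by simp
  rw [h1, List.flatten_replicate_replicate]
  show _ = (List.replicate k (' '::' '::' '::[])).flatten
  have h2 : (' '::' '::' '::[]) = List.replicate 3 ' ' := rfl
  rw [h2, List.flatten_replicate_replicate, Nat.mul_comm]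

lemma aLoop_eq_bChunks (heap : List Int) (lvl : Nat) (acc : List String)
    (hlv : lvl ≤ heap.length.size) :
    aLoop heap heap.length heap.length.size lvl acc
      = acc ++ bChunks (heap.drop (2 ^ lvl - 1)) lvl heap.length.size := by
  set n := heap.length with hn
  set s := n.size with hs
  induction hk : s - lvl generalizing lvl acc with
  | zero =>
    have hls : lvl = s := by omega
    rw [aLoop, if_neg (by omega)]
    have hdrop : heap.drop (2 ^ lvl - 1) = [] := by
      apply List.drop_eq_nil_of_le
      have h1 : n < 2 ^ s := Nat.lt_size_self n
      have h2 : 2 ^ lvl = 2 ^ s := by rw [hls]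
      omega
    rw [hdrop, bChunks, List.append_nil]
  | succ k ih =>
    have hlt : lvl < s := by omega
    have hpow : 2 ^ lvl ≤ n := Nat.lt_size.mp hlt
    have hpow1 : 1 ≤ 2 ^ lvl := Nat.one_le_two_pow
    have hpow2 : 2 ^ (lvl + 1) = 2 * 2 ^ lvl := by rw [Nat.pow_succ]; ring
    -- the remaining list is nonempty
    have hlen : (heap.drop (2 ^ lvl - 1)).length = n - (2 ^ lvl - 1) := by
      rw [List.length_drop, hn]
    obtain ⟨y, ys, hrest⟩ := List.exists_cons_of_ne_nil
      (show heap.drop (2 ^ lvl - 1) ≠ [] by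
        intro hnil; rw [hnil] at hlen; simp at hlen; omega)
    -- unfold one step of A's loop
    rw [aLoop, if_pos hlt, if_neg (by omega)]
    -- unfold one step of B's loop
    rw [hrest, bChunks, ← hrest]
    -- the slice is the chunk
    have hslice : PySem.List.slice heap (some ((2 ^ lvl - 1 : Nat) : Int))
        (some ((min (2 ^ (lvl + 1) - 1) n : Nat) : Int))
        = (heap.drop (2 ^ lvl - 1)).take (2 ^ lvl) := by
      rw [PySem.List.slice_toNat heap (Int.natCast_nonneg _) (Int.natCast_nonneg _)]
      simp only [Int.toNat_natCast]
      rw [List.take_eq_take_iff]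
      rw [hlen]
      omega
    have hdd : (heap.drop (2 ^ lvl - 1)).drop (2 ^ lvl) = heap.drop (2 ^ (lvl + 1) - 1) := by
      rw [List.drop_drop]
      congr 1
      omega
    rw [hslice, hdd, indent_eq]
    rw [ih (lvl + 1) _ (by omega) (by omega)]
    simp

-- ===== VERDICT (by name: the statement is the Claim_ definition above) =====
theorem get_tree_representation_spec : Claim_equal_get_tree_representation := by
  intro heap _
  unfold Spec_get_tree_representation get_tree_representation get_tree_representation_alt
  by_cases h : heap = []
  · simp [h]
  · simp only [h, ite_false]
    have h0 : (0:Nat) < heap.length.size ∨ heap.length.size = 0 := by omega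
    have := aLoop_eq_bChunks heap 0 [] (Nat.zero_le _)
    simp only [aHeight_eq, Nat.max_eq_right (Nat.zero_le _)] at *
    simp [this]
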